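-- pv_equiv track=rewrite | github.com/tlweave2/AI-Job-Application-Agent- | job-agent/src/prompts/planner.py | identify_rag_fields
-- ===== SOURCE A (Python) =====
-- from typing import Dict, Any, List
--
-- RAG_FIELD_INDICATORS = [
-- 	"cover letter",
-- 	"motivation",
-- 	"why do you want",
-- 	"tell us about",
-- 	"describe your",
-- 	"explain your",
-- 	"what interests you",
-- 	"additional information",
-- 	"comments",
-- 	"message to employer"
-- ]
--
-- def identify_rag_fields(elements_summary: str) -> List[str]:
-- 	"""Identify fields that should use RAG for content generation"""
-- 	rag_fields = []
-- 	elements_lower = elements_summary.lower()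
--
-- 	for indicator in RAG_FIELD_INDICATORS:
-- 		if indicator in elements_lower:
-- 			# Extract the actual field selector if possible
-- 			lines = elements_summary.split('\n')
-- 			for line in lines:
-- 				if indicator in line.lower():
-- 					rag_fields.append(line.strip())
-- 					break
--
-- 	return rag_fields
-- ===== SOURCE B (Python) =====
-- from typing import List
--
-- RAG_FIELD_INDICATORS = [
-- 	"cover letter",
-- 	"motivation",
-- 	"why do you want",
-- 	"tell us about",
-- 	"describe your",
-- 	"explain your",
-- 	"what interests you",
-- 	"additional information",
-- 	"comments",
-- 	"message to employer"
-- ]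
--
-- def identify_rag_fields(elements_summary: str) -> List[str]:
-- 	"""Identify fields that should use RAG for content generation"""
-- 	first_line = {}
-- 	for line in elements_summary.split('\n'):
-- 		line_lower = line.lower()
-- 		for indicator in RAG_FIELD_INDICATORS:
-- 			if indicator not in first_line and indicator in line_lower:
-- 				first_line[indicator] = line.strip()
-- 	return [first_line[indicator] for indicator in RAG_FIELD_INDICATORS if indicator in first_line]
-- ===== Notes on version B (the rewrite author's own statement) =====
-- stated objective: alternative
-- what changed: B splits the summary into lines once and, in a single pass over the lines, records in a dict the stripped first line matching each not-yet-found indicator, then emits the recorded lines in indicator order; A lowercases and re-splits the whole string and re-scans the lines from the top for every indicator.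
import Mathlib
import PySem

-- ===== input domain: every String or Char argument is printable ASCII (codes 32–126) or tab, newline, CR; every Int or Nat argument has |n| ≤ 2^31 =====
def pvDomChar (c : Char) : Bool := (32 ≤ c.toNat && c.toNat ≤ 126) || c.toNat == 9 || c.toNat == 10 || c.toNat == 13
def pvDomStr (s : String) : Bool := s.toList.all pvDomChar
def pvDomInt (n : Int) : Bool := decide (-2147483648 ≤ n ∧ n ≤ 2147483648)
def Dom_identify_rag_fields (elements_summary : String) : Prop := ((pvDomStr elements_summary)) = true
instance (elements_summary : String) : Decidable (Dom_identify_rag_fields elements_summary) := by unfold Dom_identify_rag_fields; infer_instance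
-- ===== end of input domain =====

-- B splits the summary into lines once and records, in one pass, the stripped first matching
-- line per indicator in a dict, then emits in indicator order — instead of A's re-split and
-- re-scan of all lines for every indicator.

-- ===== PORT A =====
def ragFieldIndicators : List String :=
  ["cover letter", "motivation", "why do you want", "tell us about", "describe your",
   "explain your", "what interests you", "additional information", "comments",
   "message to employer"]

-- A's inner loop: 'for line in lines: if indicator in line.lower(): rag_fields.append(line.strip()); break'
def ragScanLines (indicator : String) : List String → List String
  | [] => []
  | line :: rest =>
    if PySem.Str.isIn indicator (PySem.Str.lower line) then [PySem.Str.strip line]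
    else ragScanLines indicator rest

def identify_rag_fields (elements_summary : String) : List String :=
  let elements_lower := PySem.Str.lower elements_summary
  ragFieldIndicators.foldl
    (fun rag_fields indicator =>
      if PySem.Str.isIn indicator elements_lower then
        rag_fields ++ ragScanLines indicator ((PySem.Str.split? elements_summary "\n").getD [])
      else rag_fields)
    []

-- ===== PORT B =====
def identify_rag_fields_alt (elements_summary : String) : List String :=
  let lines := (PySem.Str.split? elements_summary "\n").getD []
  let first_line : PySem.Dict String String :=
    lines.foldl
      (fun d line =>
        let line_lower := PySem.Str.lower line
        ragFieldIndicators.foldl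
          (fun d indicator =>
            if d.contains indicator = false && PySem.Str.isIn indicator line_lower then
              d.insert indicator (PySem.Str.strip line)
            else d)
          d)
      PySem.Dict.empty
  ragFieldIndicators.filterMap (fun indicator => first_line.get? indicator)

-- ===== PRECONDITION & SPEC =====
def Spec_identify_rag_fields (elements_summary : String) (out : List String) : Prop := out = identify_rag_fields_alt elements_summary
instance (elements_summary : String) (out : List String) : Decidable (Spec_identify_rag_fields elements_summary out) := by unfold Spec_identify_rag_fields; infer_instance

-- ===== CLAIM (what is proved, stated in full; the proofs are below) =====
def Claim_equal_identify_rag_fields : Prop := ∀ (elements_summary : String), Dom_identify_rag_fields elements_summary → Spec_identify_rag_fields elements_summary (identify_rag_fields elements_summary)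

-- ===== LEMMAS AND PROOFS =====

-- the stripped first matching line per indicator (the value both programs record)
def ragFirst (indicator : String) : List String → Option String
  | [] => none
  | line :: rest =>
    if PySem.Str.isIn indicator (PySem.Str.lower line) then some (PySem.Str.strip line)
    else ragFirst indicator rest

theorem ragScanLines_eq_toList (indicator : String) (lines : List String) :
    ragScanLines indicator lines = (ragFirst indicator lines).toList := by
  induction lines with
  | nil => rfl
  | cons l rest ih => simp only [ragScanLines, ragFirst]; split <;> simp [ih]

theorem ragFirst_eq_none_iff (indicator : String) (lines : List String) :
    ragFirst indicator lines = none ↔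
      lines.any (fun l => PySem.Str.isIn indicator (PySem.Str.lower l)) = false := by
  induction lines with
  | nil => simp [ragFirst]
  | cons l rest ih => simp only [ragFirst]; split <;> simp_all

-- ---- PySem's fuel-based splitOn on "\n" is List.splitOn '\n' ----
theorem pySplitOn_go_eq (fuel : Nat) (l cur : List Char) (acc : List (List Char))
    (h : l.length < fuel) :
    PySem.Chars.splitOn.go ['\n'] fuel l cur acc =
      acc.reverse ++ (l.splitOn '\n').modifyHead (cur.reverse ++ ·) := by
  induction fuel generalizing l cur acc with
  | zero => omega
  | succ n ih =>
    cases l with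
    | nil =>
      rw [show PySem.Chars.splitOn.go ['\n'] (n+1) [] cur acc = (cur.reverse :: acc).reverse from rfl]
      simp [List.splitOn_nil]
    | cons c rest =>
      by_cases hc : c = '\n'
      · subst hc
        rw [show PySem.Chars.splitOn.go ['\n'] (n+1) ('\n' :: rest) cur acc =
            PySem.Chars.splitOn.go ['\n'] n (List.drop 1 ('\n' :: rest)) [] (cur.reverse :: acc) by
          simp [PySem.Chars.splitOn.go, List.isPrefixOf]]
        rw [List.drop_one, List.tail_cons]
        rw [ih rest [] (cur.reverse :: acc) (by simp at h; omega)]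
        obtain ⟨p, ps, hp⟩ := List.exists_cons_of_ne_nil (List.splitOnP_ne_nil (· == '\n') rest)
        simp only [List.splitOn] at hp ⊢
        simp [hp, List.splitOnP_cons]
      · rw [show PySem.Chars.splitOn.go ['\n'] (n+1) (c :: rest) cur acc =
            PySem.Chars.splitOn.go ['\n'] n rest (c :: cur) acc by
          simp [PySem.Chars.splitOn.go, List.isPrefixOf]
          intro h'; exact absurd h'.symm hc]
        rw [ih rest (c :: cur) acc (by simp at h; omega)]
        obtain ⟨p, ps, hp⟩ := List.exists_cons_of_ne_nil (List.splitOnP_ne_nil (· == '\n') rest)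
        simp only [List.splitOn] at hp ⊢
        simp [hp, List.splitOnP_cons, hc]

theorem pySplitOn_eq (l : List Char) :
    PySem.Chars.splitOn l ['\n'] = l.splitOn '\n' := by
  rw [PySem.Chars.splitOn, pySplitOn_go_eq (l.length + 1) l [] [] (by omega)]
  obtain ⟨p, ps, hp⟩ := List.exists_cons_of_ne_nil (List.splitOnP_ne_nil (· == '\n') l)
  simp only [List.splitOn] at hp ⊢
  simp [hp]

-- ---- lowercasing commutes with splitting on '\n' ----
theorem lowerChar_eq_newline_iff (c : Char) : PySem.Chars.lowerChar c = '\n' ↔ c = '\n' := by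
  unfold PySem.Chars.lowerChar
  split
  · rename_i hu
    simp only [PySem.Chars.isupper, Bool.and_eq_true, decide_eq_true_eq] at hu
    obtain ⟨hu1, hu2⟩ := hu
    have hu1' : 65 ≤ c.toNat := Fin.mk_le_mk.mp hu1
    have hu2' : c.toNat ≤ 90 := Fin.mk_le_mk.mp hu2
    constructor
    · intro hcontra
      exfalso
      have h2 := congrArg Char.toNat hcontra
      rw [Char.toNat_ofNat] at h2
      have hv : (c.toNat + 32).isValidChar := Or.inl (by omega)
      rw [if_pos hv] at h2
      have h10 : ('\n').toNat = 10 := by decide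
      omega
    · intro hc
      subst hc
      exact absurd hu1 (by decide)
  · exact Iff.rfl

theorem splitOn_map_pres (f : Char → Char) (c : Char) (hf : ∀ x, f x = c ↔ x = c) (l : List Char) :
    (l.map f).splitOn c = (l.splitOn c).map (List.map f) := by
  induction l with
  | nil => simp [List.splitOn_nil]
  | cons a rest ih =>
    obtain ⟨p, ps, hp⟩ := List.exists_cons_of_ne_nil (List.splitOnP_ne_nil (· == c) rest)
    simp only [List.splitOn] at *
    simp only [List.map_cons, List.splitOnP_cons, beq_iff_eq, hf a]
    by_cases hac : a = c
    · simp [hac, ih]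
    · simp [hac, ih, hp]

-- ---- an infix containing no separator is an infix of one of the pieces ----
theorem prefix_append_cons_of_not_mem {sub x y : List Char} {c : Char}
    (hc : c ∉ sub) (h : sub <+: x ++ c :: y) : sub <+: x := by
  induction sub generalizing x with
  | nil => exact List.nil_prefix
  | cons s sub' ih =>
    cases x with
    | nil =>
      obtain ⟨t, ht⟩ := h
      simp only [List.nil_append, List.cons_append, List.cons.injEq] at ht
      exact absurd (ht.1.symm ▸ List.mem_cons_self) hc
    | cons a x' =>
      obtain ⟨t, ht⟩ := h
      simp only [List.cons_append, List.cons.injEq] at ht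
      obtain ⟨rfl, ht'⟩ := ht
      have : sub' <+: x' ++ c :: y := ⟨t, ht'⟩
      exact (List.prefix_cons_inj s).mpr (ih (fun hm => hc (List.mem_cons_of_mem _ hm)) this)

theorem splitOn_head_decomp (c : Char) (l : List Char) :
    ∃ p ps t, l.splitOn c = p :: ps ∧ l = p ++ t ∧ (t = [] ∨ ∃ t', t = c :: t') := by
  induction l with
  | nil => exact ⟨[], [], [], by simp [List.splitOn_nil], by simp, Or.inl rfl⟩
  | cons a rest ih =>
    obtain ⟨p, ps, t, hsplit, hdecomp, ht⟩ := ih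
    by_cases hac : a = c
    · subst hac
      exact ⟨[], rest.splitOn a, a :: rest,
        by simp only [List.splitOn, List.splitOnP_cons, beq_self_eq_true, if_true], by simp,
        Or.inr ⟨rest, rfl⟩⟩
    · refine ⟨a :: p, ps, t, ?_, by simp [hdecomp], ht⟩
      simp only [List.splitOn, List.splitOnP_cons, beq_iff_eq, hac, if_false] at hsplit ⊢
      simp [hsplit]

theorem infix_splitOn_iff (sub l : List Char) (c : Char) (hc : c ∉ sub) :
    sub <:+: l ↔ ∃ p ∈ l.splitOn c, sub <:+: p := by
  induction l with
  | nil => simp [List.splitOn_nil]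
  | cons a rest ih =>
    rw [List.infix_cons_iff]
    by_cases hac : a = c
    · subst hac
      simp only [List.splitOn, List.splitOnP_cons, beq_self_eq_true, if_true]
      constructor
      · rintro (hpre | hinf)
        · cases sub with
          | nil => exact ⟨[], List.mem_cons_self, List.nil_infix⟩
          | cons s sub' =>
            obtain ⟨t, ht⟩ := hpre
            simp only [List.cons_append, List.cons.injEq] at ht
            exact absurd (ht.1.symm ▸ List.mem_cons_self) hc
        · obtain ⟨p, hp, hsp⟩ := ih.mp hinf
          exact ⟨p, List.mem_cons_of_mem _ (by simpa [List.splitOn] using hp), hsp⟩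
      · rintro ⟨p, hp, hsp⟩
        rcases List.mem_cons.mp hp with rfl | hp
        · have : sub = [] := List.eq_nil_of_infix_nil hsp
          subst this
          exact Or.inl List.nil_prefix
        · exact Or.inr (ih.mpr ⟨p, by simpa [List.splitOn] using hp, hsp⟩)
    · obtain ⟨p, ps, t, hsplit, hdecomp, ht⟩ := splitOn_head_decomp c rest
      have hsplit_cons : (a :: rest).splitOn c = (a :: p) :: ps := by
        simp only [List.splitOn, List.splitOnP_cons, beq_iff_eq, hac, if_false]
        simp only [List.splitOn] at hsplit
        simp [hsplit]
      rw [hsplit_cons]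
      have hih := ih
      rw [hsplit] at hih
      have key : sub <+: a :: rest ↔ sub <+: a :: p := by
        rcases ht with rfl | ⟨t', rfl⟩
        · rw [List.append_nil] at hdecomp; rw [hdecomp]
        · subst hdecomp
          constructor
          · intro h
            exact prefix_append_cons_of_not_mem hc (by simpa using h)
          · intro h
            exact h.trans ((List.prefix_cons_inj a).mpr (List.prefix_append p (c :: t')))
      constructor
      · rintro (hpre | hinf)
        · exact ⟨a :: p, List.mem_cons_self, (key.mp hpre).isInfix⟩
        · obtain ⟨q, hq, hsq⟩ := hih.mp hinf
          rcases List.mem_cons.mp hq with rfl | hq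
          · exact ⟨a :: q, List.mem_cons_self, hsq.trans (List.suffix_cons a q).isInfix⟩
          · exact ⟨q, List.mem_cons_of_mem _ hq, hsq⟩
      · rintro ⟨q, hq, hsq⟩
        rcases List.mem_cons.mp hq with rfl | hq
        · rw [List.infix_cons_iff] at hsq
          rcases hsq with hpre | hinf2
          · exact Or.inl (key.mpr hpre)
          · exact Or.inr (hih.mpr ⟨p, List.mem_cons_self, hinf2⟩)
        · exact Or.inr (hih.mpr ⟨q, List.mem_cons_of_mem _ hq, hsq⟩)

-- crux: A's whole-string membership test equals "some line matches"
theorem isIn_lower_iff_any_line (indicator s : String)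
    (hc : '\n' ∉ indicator.toList) :
    PySem.Str.isIn indicator (PySem.Str.lower s) =
      (((PySem.Str.split? s "\n").getD []).any
        (fun l => PySem.Str.isIn indicator (PySem.Str.lower l))) := by
  have hsplit : PySem.Str.split? s "\n" =
      some ((PySem.Chars.splitOn s.toList ['\n']).map String.ofList) := by
    simp [PySem.Str.split?, PySem.Chars.split?]
  rw [hsplit]
  rw [Bool.eq_iff_iff]
  simp only [Option.getD_some, List.any_map, List.any_eq_true, Function.comp]
  simp only [PySem.Str.isIn, PySem.Str.lower, String.toList_ofList]
  rw [PySem.Chars.isIn_iff_infix]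
  have hlower : PySem.Chars.lower s.toList = s.toList.map PySem.Chars.lowerChar := rfl
  rw [hlower, pySplitOn_eq,
      infix_splitOn_iff indicator.toList (s.toList.map PySem.Chars.lowerChar) '\n' hc,
      splitOn_map_pres PySem.Chars.lowerChar '\n' lowerChar_eq_newline_iff s.toList]
  constructor
  · rintro ⟨q, hq, hinf⟩
    obtain ⟨p, hp, rfl⟩ := List.mem_map.mp hq
    exact ⟨p, hp, by rw [PySem.Chars.isIn_iff_infix]; exact hinf⟩
  · rintro ⟨p, hp, hin⟩
    rw [PySem.Chars.isIn_iff_infix] at hin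
    exact ⟨p.map PySem.Chars.lowerChar, List.mem_map_of_mem hp, hin⟩

-- ---- characterisation of B's dict ----
theorem inner_fold_get? (line : String) (inds : List String) (hnd : inds.Nodup)
    (d : PySem.Dict String String) (ind : String) :
    (inds.foldl
      (fun d indicator =>
        if d.contains indicator = false && PySem.Str.isIn indicator (PySem.Str.lower line) then
          d.insert indicator (PySem.Str.strip line)
        else d) d).get? ind =
      (if ind ∈ inds ∧ d.get? ind = none ∧
          PySem.Str.isIn ind (PySem.Str.lower line) = true then
        some (PySem.Str.strip line)
      else d.get? ind) := by
  induction inds generalizing d with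
  | nil => simp
  | cons i rest ih =>
    obtain ⟨hi, hrest⟩ := List.nodup_cons.mp hnd
    rw [List.foldl_cons, ih hrest]
    by_cases hii : ind = i
    · subst hii
      simp only [hi, false_and, if_false, List.mem_cons, true_or, true_and]
      by_cases hget : d.get? ind = none
      · have hcont : d.contains ind = false := (PySem.Dict.get?_eq_none_iff_contains d ind).mp hget
        by_cases hm : PySem.Str.isIn ind (PySem.Str.lower line) = true
        · have hm' := hm
          simp only [PySem.Str.isIn, PySem.Str.lower, String.toList_ofList] at hm'
          simp [hcont, hm', PySem.Dict.get?_insert_self, hget]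
        · simp only [Bool.not_eq_true] at hm
          have hm' := hm
          simp only [PySem.Str.isIn, PySem.Str.lower, String.toList_ofList] at hm'
          simp [hcont, hm', hget]
      · have hcont : d.contains ind = true := by
          rcases Bool.eq_false_or_eq_true (d.contains ind) with h | h
          · exact h
          · exact absurd ((PySem.Dict.get?_eq_none_iff_contains d ind).mpr h) hget
        simp [hcont, hget]
    · have hstep : ∀ (e : PySem.Dict String String),
          (if e.contains i = false && PySem.Str.isIn i (PySem.Str.lower line) then
            e.insert i (PySem.Str.strip line) else e).get? ind = e.get? ind := by
        intro e
        split
        · exact PySem.Dict.get?_insert_of_ne e _ hii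
        · rfl
      rw [hstep d]
      simp [List.mem_cons, hii]

theorem outer_fold_get? (lines : List String) (d : PySem.Dict String String) (ind : String)
    (hmem : ind ∈ ragFieldIndicators) :
    (lines.foldl
      (fun d line =>
        ragFieldIndicators.foldl
          (fun d indicator =>
            if d.contains indicator = false && PySem.Str.isIn indicator (PySem.Str.lower line) then
              d.insert indicator (PySem.Str.strip line)
            else d) d) d).get? ind =
      ((d.get? ind).or (ragFirst ind lines)) := by
  induction lines generalizing d with
  | nil => simp [ragFirst]
  | cons l ls ih =>
    rw [List.foldl_cons, ih]
    rw [inner_fold_get? l ragFieldIndicators (by decide) d ind]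
    by_cases hget : d.get? ind = none
    · by_cases hm : PySem.Str.isIn ind (PySem.Str.lower l) = true
      · have hm' := hm
        simp only [PySem.Str.isIn, PySem.Str.lower, String.toList_ofList] at hm'
        simp [hmem, hget, hm', ragFirst]
      · simp only [Bool.not_eq_true] at hm
        have hm' := hm
        simp only [PySem.Str.isIn, PySem.Str.lower, String.toList_ofList] at hm'
        simp [hmem, hget, hm', ragFirst]
    · obtain ⟨v, hv⟩ := Option.ne_none_iff_exists'.mp hget
      simp [hv, ragFirst]

-- ===== VERDICT (by name: the statement is the Claim_ definition above) =====
theorem identify_rag_fields_spec : Claim_equal_identify_rag_fields := by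
  unfold Claim_equal_identify_rag_fields
  intro s _
  unfold Spec_identify_rag_fields identify_rag_fields identify_rag_fields_alt
  dsimp only
  have hnl : ∀ ind ∈ ragFieldIndicators, '\n' ∉ ind.toList := by decide
  -- A-side: each indicator contributes exactly (ragFirst ind lines).toList
  rw [PySem.List.foldl_congr_mem ragFieldIndicators _
      (fun acc ind =>
        acc ++ (ragFirst ind ((PySem.Str.split? s "\n").getD [])).toList) []
      (by
        intro acc ind hind
        rw [isIn_lower_iff_any_line ind s (hnl ind hind)]
        rcases Bool.eq_false_or_eq_true
            (((PySem.Str.split? s "\n").getD []).any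
              (fun l => PySem.Str.isIn ind (PySem.Str.lower l))) with hany | hany
        · rw [hany]
          simp [ragScanLines_eq_toList]
        · rw [hany]
          simp [(ragFirst_eq_none_iff ind _).mpr hany])]
  rw [PySem.List.foldl_append_eq_flatMap, List.nil_append]
  -- B-side: the dict lookup is ragFirst
  rw [List.filterMap_congr
      (g := fun ind => ragFirst ind ((PySem.Str.split? s "\n").getD []))
      (by
        intro ind hind
        rw [outer_fold_get? _ PySem.Dict.empty ind hind, PySem.Dict.get?_empty]
        rfl)]
  rw [List.filterMap_eq_flatMap_toList]
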